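-- pv_equiv track=rewrite | github.com/DrSelenium/mouse2 | main.py | generate_stop_tokens
-- ===== SOURCE A (Python) =====
-- from typing import List, Tuple, Dict, Set, Optional
-- from typing import List
--
-- def generate_stop_tokens(momentum: int) -> List[str]:
--     """Generate tokens to stop from current momentum."""
--     tokens = []
--     current_m = momentum
--
--     while current_m != 0:
--         if abs(current_m) <= 2:
--             tokens.append('F0' if current_m > 0 else 'V0')
--             current_m += -1 if current_m > 0 else 1
--         else:
--             tokens.append('BB')
--             current_m += -2 if current_m > 0 else 2
--
--     return tokens
-- ===== SOURCE B (Python) =====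
-- def generate_stop_tokens(momentum: int) -> list:
--     """Generate tokens to stop from current momentum (closed form)."""
--     if momentum == 0:
--         return []
--     n = abs(momentum)
--     small = 'F0' if momentum > 0 else 'V0'
--     r = 2 if n % 2 == 0 else 1
--     return ['BB'] * ((n - r) // 2) + [small] * r
-- ===== Notes on version B (the rewrite author's own statement) =====
-- stated objective: simpler
-- what changed: Replaces A's step-by-step decrement loop (one token per iteration with branching) with closed-form arithmetic: the count of 'BB' tokens and the one-or-two terminal small tokens are computed directly from the magnitude and its parity, then built with list replication.
import Mathlib
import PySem

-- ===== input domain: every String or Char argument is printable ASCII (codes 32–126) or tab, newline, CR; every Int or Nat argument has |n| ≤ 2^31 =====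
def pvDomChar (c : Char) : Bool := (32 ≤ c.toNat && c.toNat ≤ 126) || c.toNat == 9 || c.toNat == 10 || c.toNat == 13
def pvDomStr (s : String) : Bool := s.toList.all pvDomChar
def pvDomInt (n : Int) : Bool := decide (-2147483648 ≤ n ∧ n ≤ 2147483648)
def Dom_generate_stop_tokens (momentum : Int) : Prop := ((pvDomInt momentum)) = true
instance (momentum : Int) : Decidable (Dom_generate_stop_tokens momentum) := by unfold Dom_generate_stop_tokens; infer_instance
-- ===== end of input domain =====

-- B replaces A's step-by-step decrement loop by closed-form arithmetic on |momentum| (objective: simpler).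

-- ===== PORT A =====
-- while loop of A: state (tokens, current_m), one iteration per step
def generate_stop_tokens_loop (tokens : List String) (current_m : Int) : List String :=
  if current_m ≠ 0 then
    if |current_m| ≤ 2 then
      generate_stop_tokens_loop (tokens ++ [if current_m > 0 then "F0" else "V0"])
        (current_m + (if current_m > 0 then -1 else 1))
    else
      generate_stop_tokens_loop (tokens ++ ["BB"])
        (current_m + (if current_m > 0 then -2 else 2))
  else tokens
termination_by current_m.natAbs
decreasing_by all_goals (simp only [Int.abs_eq_natAbs] at *; split <;> omega)

def generate_stop_tokens (momentum : Int) : List String :=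
  generate_stop_tokens_loop [] momentum

-- ===== PORT B =====
def generate_stop_tokens_alt (momentum : Int) : List String :=
  if momentum = 0 then []
  else
    let n : Int := |momentum|
    let small : String := if momentum > 0 then "F0" else "V0"
    let r : Int := if n % 2 = 0 then 2 else 1
    -- Python's (n - r) // 2: here n - r ≥ 0, so Lean's Int '/' is exact for it
    List.replicate ((n - r) / 2).toNat "BB" ++ List.replicate r.toNat small

-- ===== PRECONDITION & SPEC =====
def Spec_generate_stop_tokens (momentum : Int) (out : List String) : Prop := out = generate_stop_tokens_alt momentum
instance (momentum : Int) (out : List String) : Decidable (Spec_generate_stop_tokens momentum out) := by unfold Spec_generate_stop_tokens; infer_instance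

-- ===== CLAIM (what is proved, stated in full; the proofs are below) =====
def Claim_equal_generate_stop_tokens : Prop := ∀ (momentum : Int), Dom_generate_stop_tokens momentum → Spec_generate_stop_tokens momentum (generate_stop_tokens momentum)

-- ===== LEMMAS AND PROOFS =====

-- closed form absorbs one 'BB' step (positive side)
lemma alt_step_pos (m : Int) (h : 2 < m) :
    generate_stop_tokens_alt m = "BB" :: generate_stop_tokens_alt (m - 2) := by
  simp only [generate_stop_tokens_alt]
  have hm : ¬ m = 0 := by omega
  have hm2 : ¬ m - 2 = 0 := by omega
  have habs : |m| = m := abs_of_pos (by omega)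
  have habs2 : |m - 2| = m - 2 := abs_of_pos (by omega)
  have hmod : (m - 2) % 2 = m % 2 := by omega
  simp only [hm, hm2, if_false, habs, habs2, hmod, show m > 0 from by omega,
    show m - 2 > 0 from by omega, if_true]
  by_cases hp : m % 2 = 0
  · simp only [hp, if_true]
    rw [show ((m - 2) / 2).toNat = ((m - 2 - 2) / 2).toNat + 1 from by omega,
      List.replicate_succ]
    simp
  · simp only [hp, if_false]
    rw [show ((m - 1) / 2).toNat = ((m - 2 - 1) / 2).toNat + 1 from by omega,
      List.replicate_succ]
    simp

-- placeholder
lemma alt_step_neg (m : Int) (h : m < -2) :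
    generate_stop_tokens_alt m = "BB" :: generate_stop_tokens_alt (m + 2) := by
  simp only [generate_stop_tokens_alt]
  have hm : ¬ m = 0 := by omega
  have hm2 : ¬ m + 2 = 0 := by omega
  have habs : |m| = -m := abs_of_neg (by omega)
  have habs2 : |m + 2| = -(m + 2) := abs_of_neg (by omega)
  have hmod : -(m + 2) % 2 = -m % 2 := by omega
  simp only [hm, hm2, if_false, habs, habs2, hmod, show ¬ m > 0 from by omega,
    show ¬ m + 2 > 0 from by omega]
  by_cases hp : -m % 2 = 0
  · simp only [hp, if_true]
    rw [show ((-m - 2) / 2).toNat = ((-(m + 2) - 2) / 2).toNat + 1 from by omega,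
      List.replicate_succ]
    simp
  · simp only [hp, if_false]
    rw [show ((-m - 1) / 2).toNat = ((-(m + 2) - 1) / 2).toNat + 1 from by omega,
      List.replicate_succ]
    simp

lemma loop_eq (n : Nat) : ∀ (m : Int), m.natAbs = n → ∀ (t : List String),
    generate_stop_tokens_loop t m = t ++ generate_stop_tokens_alt m := by
  induction n using Nat.strong_induction_on with
  | _ n ih =>
    intro m hn t
    rw [generate_stop_tokens_loop]
    by_cases h0 : m = 0
    · subst h0; simp [generate_stop_tokens_alt]
    · simp only [h0, ne_eq, not_false_eq_true, if_true]
      by_cases hs : |m| ≤ 2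
      · have : m = 1 ∨ m = 2 ∨ m = -1 ∨ m = -2 := by
          rcases abs_le.mp hs with ⟨h1, h2⟩; omega
        rcases this with h | h | h | h <;> subst h <;>
          · rw [ih _ (by omega) _ rfl]
            simp [generate_stop_tokens_alt]
      · simp only [hs, if_false]
        have habs : 2 < |m| := by omega
        by_cases hpos : m > 0
        · have h2 : 2 < m := by rw [abs_of_pos hpos] at habs; omega
          simp only [hpos, if_true]
          rw [ih (m + -2).natAbs (by rw [abs_of_pos hpos] at habs; omega) _ rfl]
          rw [alt_step_pos m h2]
          simp [show m + -2 = m - 2 from by ring]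
        · have h2 : m < -2 := by rw [abs_of_neg (by omega)] at habs; omega
          simp only [hpos, if_false]
          rw [ih (m + 2).natAbs (by omega) _ rfl]
          rw [alt_step_neg m h2]
          simp

-- ===== VERDICT (by name: the statement is the Claim_ definition above) =====
theorem generate_stop_tokens_spec : Claim_equal_generate_stop_tokens := by
  intro m _
  unfold Spec_generate_stop_tokens generate_stop_tokens
  simpa using loop_eq m.natAbs m rfl []
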